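-- pv_equiv track=rewrite | github.com/LuisGiraldo86/project-euler | project_euler/euler_18.py | total_paths
-- ===== SOURCE A (Python) =====
-- def total_paths(triangle):
--
--     """
--     Function to construct all possible paths from top to bottom of the triangle.
--
--     Parameter
--     ---------
--     triangle: list of lists
--         list of list containing the values of the triangle.
--
--     Returns
--     -------
--     list of lists
--     """
--
--     paths = [[(0,0)]]
--     for k in range(1,len(triangle)):
--         temp = []
--         for n in range(len(triangle[k])):
--             for path in paths:
--                 if path[-1]==(k-1,n-1) or path[-1]==(k-1,n):
--                     temp.append(path + [(k,n)])
--         if len(temp)!=0: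
--             paths = temp
--     return paths
-- ===== SOURCE B (Python) =====
-- def total_paths(triangle):
--     """Frontier of path-groups indexed by ending column: each row extends every
--     group directly to its two children instead of rescanning all paths per column."""
--
--     def grp(groups, n):
--         return groups[n] if 0 <= n < len(groups) else []
--
--     groups = [[[(0, 0)]]]
--     for k in range(1, len(triangle)):
--         new = [[p + [(k, n)] for p in grp(groups, n - 1) + grp(groups, n)]
--                for n in range(len(triangle[k]))]
--         if not any(new):
--             break
--         groups = new
--     return [p for g in groups for p in g]
-- ===== Notes on version B (the rewrite author's own statement) =====
-- stated objective: alternative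
-- what changed: B keeps a frontier of path-groups indexed by ending column and extends each group directly to its two children per row (stopping early when a row produces nothing), instead of A's rescanning every accumulated path for every column and testing its last coordinate.
import Mathlib
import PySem

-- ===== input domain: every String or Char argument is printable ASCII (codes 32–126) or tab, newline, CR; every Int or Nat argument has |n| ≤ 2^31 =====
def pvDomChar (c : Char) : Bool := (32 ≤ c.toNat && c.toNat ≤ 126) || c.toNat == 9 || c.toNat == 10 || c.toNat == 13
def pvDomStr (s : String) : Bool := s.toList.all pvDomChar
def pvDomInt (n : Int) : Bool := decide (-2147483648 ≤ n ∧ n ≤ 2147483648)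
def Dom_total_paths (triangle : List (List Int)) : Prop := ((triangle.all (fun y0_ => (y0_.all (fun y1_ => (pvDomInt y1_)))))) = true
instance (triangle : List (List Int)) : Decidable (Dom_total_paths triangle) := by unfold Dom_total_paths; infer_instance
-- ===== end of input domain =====

-- B replaces A's per-column rescan of all paths with a frontier of path-groups indexed by
-- ending column, extending each group directly to its two children (objective: alternative).

-- ===== PORT A =====
-- path[-1] is ported as List.getLast?; every path A stores is nonempty, so Python never
-- raises there and the comparison with `some _` is exact.
def total_paths (triangle : List (List Int)) : List (List (Int × Int)) :=
  (PySem.List.pyRange 1 (triangle.length : Int) 1).foldl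
    (fun paths k =>
      let temp :=
        (PySem.List.pyRange 0 ((PySem.List.pyGetD triangle k []).length : Int) 1).foldl
          (fun temp n =>
            paths.foldl
              (fun temp path =>
                if path.getLast? = some (k - 1, n - 1) ∨ path.getLast? = some (k - 1, n)
                then temp ++ [path ++ [(k, n)]] else temp)
              temp)
          []
      if temp.length ≠ 0 then temp else paths)
    [[(0, 0)]]

-- ===== PORT B =====
-- grp(groups, n) = groups[n] if 0 <= n < len(groups) else []  (List.getD covers the upper bound)
def pvGrp (groups : List (List (List (Int × Int)))) (n : Int) : List (List (Int × Int)) :=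
  if 0 ≤ n then groups.getD n.toNat [] else []

-- the row loop of Source B: recursion over the remaining rows; `break` = returning `groups`
def pvRows (rows : List (List Int)) (k : Int)
    (groups : List (List (List (Int × Int)))) : List (List (List (Int × Int))) :=
  match rows with
  | [] => groups
  | row :: rest =>
      let new := (List.range row.length).map (fun (n : Nat) =>
        (pvGrp groups ((n : Int) - 1) ++ pvGrp groups (n : Int)).map
          (fun p => p ++ [(k, (n : Int))]))
      if new.all (· = []) then groups else pvRows rest (k + 1) new

def total_paths_alt (triangle : List (List Int)) : List (List (Int × Int)) :=
  (pvRows (triangle.drop 1) 1 [[[(0, 0)]]]).flatten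

-- ===== PRECONDITION & SPEC =====
def Spec_total_paths (triangle : List (List Int)) (out : List (List (Int × Int))) : Prop := out = total_paths_alt triangle
instance (triangle : List (List Int)) (out : List (List (Int × Int))) : Decidable (Spec_total_paths triangle out) := by unfold Spec_total_paths; infer_instance

-- ===== CLAIM (what is proved, stated in full; the proofs are below) =====
def Claim_equal_total_paths : Prop := ∀ (triangle : List (List Int)), Dom_total_paths triangle → Spec_total_paths triangle (total_paths triangle)

-- ===== LEMMAS AND PROOFS =====

-- A's inner two loops for one row of width w, as a named function of the loop state
def pvTempOf (k : Int) (w : Nat) (paths : List (List (Int × Int))) : List (List (Int × Int)) :=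
  (PySem.List.pyRange 0 (w : Int) 1).foldl
    (fun temp n =>
      paths.foldl
        (fun temp path =>
          if path.getLast? = some (k - 1, n - 1) ∨ path.getLast? = some (k - 1, n)
          then temp ++ [path ++ [(k, n)]] else temp)
        temp)
    []

-- A's outer loop, re-expressed as recursion over the list of remaining rows
def pvLoopA (rows : List (List Int)) (k : Int) (paths : List (List (Int × Int))) : List (List (Int × Int)) :=
  match rows with
  | [] => paths
  | row :: rest =>
      pvLoopA rest (k + 1)
        (if (pvTempOf k row.length paths).length ≠ 0 then pvTempOf k row.length paths else paths)

-- frontier invariant: group i holds only paths ending at (r, i)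
def pvInv (r : Int) (groups : List (List (List (Int × Int)))) : Prop :=
  ∀ (i : Nat) (p : List (Int × Int)), p ∈ groups.getD i [] → p.getLast? = some (r, (i : Int))

theorem pvGrp_neg (gs : List (List (List (Int × Int)))) (j : Int) (h : j < 0) : pvGrp gs j = [] := by
  unfold pvGrp
  rw [if_neg (by omega)]

theorem pvGrp_cons (g : List (List (Int × Int))) (rest : List (List (List (Int × Int)))) (j : Int) :
    pvGrp (g :: rest) j = if j = 0 then g else pvGrp rest (j - 1) := by
  unfold pvGrp
  by_cases h2 : j = 0
  · subst h2; simp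
  · by_cases h1 : 0 ≤ j
    · have h3 : 0 ≤ j - 1 := by omega
      have ht : j.toNat = (j - 1).toNat + 1 := by omega
      rw [if_pos h1, if_neg h2, if_pos h3, ht, List.getD_cons_succ]
    · have h3 : ¬ 0 ≤ j - 1 := by omega
      rw [if_neg h1, if_neg h2, if_neg h3]

theorem pvTempOf_eq (k : Int) (w : Nat) (paths : List (List (Int × Int))) :
    pvTempOf k w paths =
      ((List.range w).map (fun (n : Nat) =>
        (paths.filter (fun p =>
          decide (p.getLast? = some (k - 1, (n : Int) - 1) ∨ p.getLast? = some (k - 1, (n : Int))))).map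
          (fun p => p ++ [(k, (n : Int))]))).flatten := by
  unfold pvTempOf
  rw [PySem.List.pyRange_zero_nat, List.foldl_map]
  have key : ∀ (l : List Nat) (acc : List (List (Int × Int))),
      l.foldl (fun (temp : List (List (Int × Int))) (n : Nat) =>
        paths.foldl
          (fun temp path =>
            if path.getLast? = some (k - 1, (n : Int) - 1) ∨ path.getLast? = some (k - 1, (n : Int))
            then temp ++ [path ++ [(k, (n : Int))]] else temp)
          temp) acc
      = acc ++ (l.map (fun (n : Nat) =>
          (paths.filter (fun p =>
            decide (p.getLast? = some (k - 1, (n : Int) - 1) ∨ p.getLast? = some (k - 1, (n : Int))))).map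
            (fun p => p ++ [(k, (n : Int))]))).flatten := by
    intro l
    induction l with
    | nil =>
        intro acc
        simp only [List.foldl_nil, List.map_nil, List.flatten_nil, List.append_nil]
    | cons x xs ih =>
        intro acc
        simp only [List.foldl_cons, List.map_cons, List.flatten_cons]
        rw [PySem.List.foldl_append_ite
            (fun path => path.getLast? = some (k - 1, (x : Int) - 1) ∨ path.getLast? = some (k - 1, (x : Int)))
            (fun path => path ++ [(k, (x : Int))]) paths acc,
          ih, List.append_assoc]
  simpa using key (List.range w) []

theorem pvFilter_two_col (r : Int) :
    ∀ (gs : List (List (List (Int × Int)))) (b c₁ c₂ : Int), c₂ = c₁ + 1 →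
      (∀ (i : Nat) (p : List (Int × Int)), p ∈ gs.getD i [] → p.getLast? = some (r, b + (i : Int))) →
      gs.flatten.filter (fun p =>
          decide (p.getLast? = some (r, c₁) ∨ p.getLast? = some (r, c₂)))
        = pvGrp gs (c₁ - b) ++ pvGrp gs (c₂ - b) := by
  intro gs
  induction gs with
  | nil =>
      intro b c₁ c₂ _ _
      simp [pvGrp]
  | cons g rest ih =>
      intro b c₁ c₂ hc H
      subst hc
      have hg : ∀ p ∈ g, p.getLast? = some (r, b) := by
        intro p hp
        have := H 0 p (by simpa using hp)
        simpa using this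
      have Hrest : ∀ (i : Nat) (p : List (Int × Int)), p ∈ rest.getD i [] →
          p.getLast? = some (r, (b + 1) + (i : Int)) := by
        intro i p hp
        have := H (i + 1) p (by simpa [List.getD_cons_succ] using hp)
        convert this using 3
        push_cast
        ring
      rw [List.flatten_cons, List.filter_append, ih (b + 1) c₁ (c₁ + 1) rfl Hrest,
        pvGrp_cons, pvGrp_cons]
      have e1 : c₁ - (b + 1) = c₁ - b - 1 := by ring
      have e2 : c₁ + 1 - (b + 1) = c₁ - b := by ring
      have e3 : c₁ + 1 - b - 1 = c₁ - b := by ring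
      rw [e1, e2]
      by_cases h1 : b = c₁
      · have hfg : g.filter (fun p =>
            decide (p.getLast? = some (r, c₁) ∨ p.getLast? = some (r, c₁ + 1))) = g := by
          rw [List.filter_eq_self]
          intro p hp
          simp [hg p hp, h1]
        rw [hfg, pvGrp_neg rest (c₁ - b - 1) (by omega), if_pos (by omega), if_neg (by omega), e3]
        simp
      · by_cases h2 : b = c₁ + 1
        · have hfg : g.filter (fun p =>
              decide (p.getLast? = some (r, c₁) ∨ p.getLast? = some (r, c₁ + 1))) = g := by
            rw [List.filter_eq_self]
            intro p hp
            simp [hg p hp, h2]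
          rw [hfg, pvGrp_neg rest (c₁ - b - 1) (by omega), pvGrp_neg rest (c₁ - b) (by omega),
            if_neg (by omega), if_pos (by omega)]
          simp
        · have hfg : g.filter (fun p =>
              decide (p.getLast? = some (r, c₁) ∨ p.getLast? = some (r, c₁ + 1))) = [] := by
            rw [List.filter_eq_nil_iff]
            intro p hp
            simp only [hg p hp, decide_eq_true_eq, Option.some.injEq, Prod.mk.injEq, not_or]
            constructor <;> (intro hcon; exact absurd hcon.2 (by omega))
          rw [hfg, if_neg (by omega), if_neg (by omega), e3]
          simp
  
theorem pvStall : ∀ (rows : List (List Int)) (k r : Int) (paths : List (List (Int × Int))),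
    (∀ p ∈ paths, ∃ c : Int, p.getLast? = some (r, c)) → r + 1 < k →
    pvLoopA rows k paths = paths := by
  intro rows
  induction rows with
  | nil => intros; rfl
  | cons row rest ih =>
      intro k r paths H hk
      have htemp : pvTempOf k row.length paths = [] := by
        rw [pvTempOf_eq, List.flatten_eq_nil_iff]
        intro l hl
        rw [List.mem_map] at hl
        obtain ⟨n, _, rfl⟩ := hl
        rw [List.map_eq_nil_iff, List.filter_eq_nil_iff]
        intro p hp hdec
        obtain ⟨c, hc⟩ := H p hp
        simp only [hc, decide_eq_true_eq, Option.some.injEq, Prod.mk.injEq] at hdec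
        rcases hdec with ⟨h, _⟩ | ⟨h, _⟩ <;> omega
      simp only [pvLoopA, htemp]
      rw [if_neg (by simp)]
      exact ih (k + 1) r paths H (by omega)

theorem pvCore : ∀ (rows : List (List Int)) (k : Int) (groups : List (List (List (Int × Int)))),
    pvInv (k - 1) groups →
    pvLoopA rows k groups.flatten = (pvRows rows k groups).flatten := by
  intro rows
  induction rows with
  | nil => intros; rfl
  | cons row rest ih =>
      intro k groups hInv
      set new := (List.range row.length).map (fun (n : Nat) =>
        (pvGrp groups ((n : Int) - 1) ++ pvGrp groups (n : Int)).map
          (fun p => p ++ [(k, (n : Int))])) with hnew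
      have hRows : pvRows (row :: rest) k groups =
          if new.all (· = []) then groups else pvRows rest (k + 1) new := rfl
      have htemp : pvTempOf k row.length groups.flatten = new.flatten := by
        rw [pvTempOf_eq, hnew]
        congr 1
        apply List.map_congr_left
        intro n _
        dsimp only
        rw [pvFilter_two_col (k - 1) groups 0 ((n : Int) - 1) (n : Int) (by ring)
            (by intro i p hp; simpa using hInv i p hp)]
        norm_num
      have hInvNew : pvInv k new := by
        intro i p hp
        by_cases hi : i < row.length
        · rw [hnew, PySem.List.getD_map_range _ _ _ _ hi] at hp
          simp only [List.mem_map] at hp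
          obtain ⟨q, _, rfl⟩ := hp
          exact List.getLast?_concat
        · rw [List.getD_eq_default] at hp
          · simp at hp
          · rw [hnew]; simpa using hi
      simp only [pvLoopA, htemp, hRows]
      by_cases hstall : new.all (· = []) = true
      · have hflat : new.flatten = [] :=
          List.flatten_eq_nil_iff.mpr (by
            intro l hl
            simpa using List.all_eq_true.mp hstall l hl)
        rw [hflat, if_neg (by simp), if_pos hstall]
        have hlast : ∀ p ∈ groups.flatten, ∃ c : Int, p.getLast? = some (k - 1, c) := by
          intro p hp
          rw [List.mem_flatten] at hp
          obtain ⟨l, hl, hpl⟩ := hp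
          obtain ⟨j, hj, rfl⟩ := List.getElem_of_mem hl
          refine ⟨(j : Int), hInv j p ?_⟩
          rw [List.getD_eq_getElem _ _ hj]
          exact hpl
        exact pvStall rest (k + 1) (k - 1) groups.flatten hlast (by omega)
      · have hflat : new.flatten ≠ [] := by
          intro hcon
          exact hstall (List.all_eq_true.mpr (by
            intro l hl
            simpa using List.flatten_eq_nil_iff.mp hcon l hl))
        have hlen : new.flatten.length ≠ 0 := by
          intro h0
          exact hflat (List.length_eq_zero_iff.mp h0)
        rw [if_pos hlen, if_neg hstall]
        have := ih (k + 1) new (by simpa using hInvNew)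
        exact this

-- A's loop body as a named function (definitionally the lambda inside total_paths)
def pvBodyA (triangle : List (List Int)) (paths : List (List (Int × Int))) (k : Int) :
    List (List (Int × Int)) :=
  let temp :=
    (PySem.List.pyRange 0 ((PySem.List.pyGetD triangle k []).length : Int) 1).foldl
      (fun temp n =>
        paths.foldl
          (fun temp path =>
            if path.getLast? = some (k - 1, n - 1) ∨ path.getLast? = some (k - 1, n)
            then temp ++ [path ++ [(k, n)]] else temp)
          temp)
      []
  if temp.length ≠ 0 then temp else paths

theorem pvBodyA_eq (t : List (List Int)) (paths : List (List (Int × Int))) (j : Nat)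
    (hj : j < t.length) :
    pvBodyA t paths (j : Int) =
      if (pvTempOf (j : Int) t[j].length paths).length ≠ 0
      then pvTempOf (j : Int) t[j].length paths else paths := by
  have hget : PySem.List.pyGetD t ((j : Nat) : Int) [] = t[j] := by
    rw [PySem.List.pyGetD_natCast]
    exact List.getD_eq_getElem _ _ hj
  unfold pvBodyA pvTempOf
  rw [hget]

theorem pvBridgeAux (t : List (List Int)) :
    ∀ (m j : Nat) (paths : List (List (Int × Int))), t.length - j = m →
      (PySem.List.pyRange (j : Int) (t.length : Int) 1).foldl (pvBodyA t) paths
        = pvLoopA (t.drop j) (j : Int) paths := by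
  intro m
  induction m with
  | zero =>
      intro j paths hm
      have hle : t.length ≤ j := by omega
      rw [PySem.List.pyRange_one_eq_nil (by exact_mod_cast hle), List.drop_eq_nil_of_le hle]
      rfl
  | succ m ih =>
      intro j paths hm
      have hj : j < t.length := by omega
      rw [PySem.List.pyRange_one_cons (by exact_mod_cast hj), List.foldl_cons,
        List.drop_eq_getElem_cons hj]
      simp only [pvLoopA]
      have hcast : ((j : Nat) : Int) + 1 = (((j + 1 : Nat)) : Int) := by push_cast; ring
      rw [pvBodyA_eq t paths j hj, hcast, ih (j + 1) _ (by omega)]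

theorem pvBridgeA (t : List (List Int)) :
    total_paths t = pvLoopA (t.drop 1) 1 [[(0, 0)]] := by
  have h1 : total_paths t =
      (PySem.List.pyRange ((1 : Nat) : Int) (t.length : Int) 1).foldl (pvBodyA t) [[(0, 0)]] := rfl
  rw [h1, pvBridgeAux t (t.length - 1) 1 [[(0, 0)]] rfl]
  norm_num

-- ===== VERDICT (by name: the statement is the Claim_ definition above) =====
theorem total_paths_spec : Claim_equal_total_paths := by
  intro t _
  show total_paths t = total_paths_alt t
  rw [pvBridgeA]
  have h0 : pvInv (1 - 1) [[[(0, 0)]]] := by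
    intro i p hp
    match i with
    | 0 =>
        simp only [List.getD_cons_zero, List.mem_singleton] at hp
        simp [hp]
    | i + 1 =>
        simp [List.getD] at hp
  have := pvCore (t.drop 1) 1 [[[(0, 0)]]] h0
  simpa [total_paths_alt] using this
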